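-- pv_equiv track=rewrite | github.com/StFavn/PythonBasic_skillbox | Module16/05_songs/main.py | how_many_time
-- ===== SOURCE A (Python) =====
-- def how_many_time(violator_songs_list, new_list):
--     duration = 0
--     for right_song in new_list:
--         for song in violator_songs_list:
--             if right_song == song[0]:
--                 duration += song[1]
--                 break
--     return duration
-- ===== SOURCE B (Python) =====
-- def how_many_time(violator_songs_list, new_list):
--     counts = {}
--     for name in new_list:
--         counts[name] = counts.get(name, 0) + 1
--     first = {}
--     for name, dur in violator_songs_list:
--         if name not in first:
--             first[name] = dur
--     return sum(dur * counts.get(name, 0) for name, dur in first.items())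
-- ===== Notes on version B (the rewrite author's own statement) =====
-- stated objective: faster
-- what changed: Replaces the per-request rescan of the song list by two prebuilt tables (a request Counter and a first-occurrence duration dict) and one weighted pass over distinct songs.
import Mathlib
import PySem

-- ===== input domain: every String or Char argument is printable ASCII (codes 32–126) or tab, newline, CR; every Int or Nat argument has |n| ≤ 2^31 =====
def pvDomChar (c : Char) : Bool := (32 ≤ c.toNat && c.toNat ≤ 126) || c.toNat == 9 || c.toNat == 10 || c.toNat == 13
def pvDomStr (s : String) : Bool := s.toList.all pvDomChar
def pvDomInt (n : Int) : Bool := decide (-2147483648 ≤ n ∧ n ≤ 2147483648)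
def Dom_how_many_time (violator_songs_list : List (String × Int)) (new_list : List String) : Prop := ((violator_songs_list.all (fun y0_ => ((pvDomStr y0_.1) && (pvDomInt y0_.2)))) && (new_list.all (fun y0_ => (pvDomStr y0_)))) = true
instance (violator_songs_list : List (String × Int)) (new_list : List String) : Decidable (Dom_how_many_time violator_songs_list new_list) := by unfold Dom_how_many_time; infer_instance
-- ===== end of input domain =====

-- B replaces A's per-request rescan of the song list by two prebuilt tables (a request
-- counter and a first-occurrence duration dict) and one weighted pass over distinct songs (faster).

-- ===== PORT A =====
-- inner 'for song in violator_songs_list: … break' loop of A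
def pvInnerA (violator_songs_list : List (String × Int)) (right_song : String) (duration : Int) : Int :=
  match violator_songs_list with
  | [] => duration
  | song :: rest =>
      if right_song == song.1 then duration + song.2
      else pvInnerA rest right_song duration

def how_many_time (violator_songs_list : List (String × Int)) (new_list : List String) : Int :=
  new_list.foldl (fun duration right_song => pvInnerA violator_songs_list right_song duration) 0

-- ===== PORT B =====
def how_many_time_alt (violator_songs_list : List (String × Int)) (new_list : List String) : Int :=
  let counts : PySem.Dict String Int :=
    new_list.foldl (fun d name => d.insert name (d.getD name 0 + 1)) PySem.Dict.empty
  let first : PySem.Dict String Int :=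
    violator_songs_list.foldl
      (fun d p => if d.contains p.1 then d else d.insert p.1 p.2) PySem.Dict.empty
  (first.items.map (fun p => p.2 * counts.getD p.1 0)).sum

-- ===== PRECONDITION & SPEC =====
def Spec_how_many_time (violator_songs_list : List (String × Int)) (new_list : List String) (out : Int) : Prop := out = how_many_time_alt violator_songs_list new_list
instance (violator_songs_list : List (String × Int)) (new_list : List String) (out : Int) : Decidable (Spec_how_many_time violator_songs_list new_list out) := by unfold Spec_how_many_time; infer_instance

-- ===== CLAIM (what is proved, stated in full; the proofs are below) =====
def Claim_equal_how_many_time : Prop := ∀ (violator_songs_list : List (String × Int)) (new_list : List String), Dom_how_many_time violator_songs_list new_list → Spec_how_many_time violator_songs_list new_list (how_many_time violator_songs_list new_list)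

-- ===== LEMMAS AND PROOFS =====

-- duration of the first song named r (0 if none): the value A's inner loop adds
def pvG (vs : List (String × Int)) (r : String) : Int :=
  match vs with
  | [] => 0
  | s :: t => if r == s.1 then s.2 else pvG t r

theorem pvInnerA_eq (vs : List (String × Int)) (r : String) (d : Int) :
    pvInnerA vs r d = d + pvG vs r := by
  induction vs with
  | nil => simp [pvInnerA, pvG]
  | cons s t ih => by_cases h : r == s.1 <;> simp [pvInnerA, pvG, h, ih]

-- A is the sum of pvG over the requests
theorem howA_eq_sum (vs : List (String × Int)) (nl : List String) :
    how_many_time vs nl = (nl.map (pvG vs)).sum := by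
  unfold how_many_time
  have hf : (fun (d : Int) (r : String) => pvInnerA vs r d)
      = (fun (d : Int) (r : String) => d + pvG vs r) := by
    funext d r; exact pvInnerA_eq vs r d
  rw [hf, PySem.List.foldl_add]
  simp

-- the step of B's first-occurrence loop
def pvStep (d : PySem.Dict String Int) (p : String × Int) : PySem.Dict String Int :=
  if d.contains p.1 then d else d.insert p.1 p.2

theorem first_get? (vs : List (String × Int)) (d : PySem.Dict String Int) (n : String) :
    (vs.foldl pvStep d).get? n =
      match d.get? n with
      | some v => some v
      | none => (vs.find? (fun p => p.1 == n)).map (·.2) := by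
  induction vs generalizing d with
  | nil => cases h : d.get? n <;> simp [h]
  | cons s t ih =>
    rw [List.foldl_cons]
    by_cases hc : d.contains s.1
    · have hstep : pvStep d s = d := by simp [pvStep, hc]
      rw [hstep, ih]
      by_cases hn : s.1 == n
      · have hns : n = s.1 := (beq_iff_eq.mp hn).symm
        have h2 := PySem.Dict.contains_eq_isSome_get? d s.1
        rw [hc] at h2
        cases hget : d.get? n with
        | some v => simp
        | none => rw [hns] at hget; rw [hget] at h2; simp at h2
      · simp [List.find?, hn]
    · have hstep : pvStep d s = d.insert s.1 s.2 := by simp [pvStep, hc]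
      rw [hstep, ih]
      have hdnone : d.get? s.1 = none := by
        have h2 := PySem.Dict.contains_eq_isSome_get? d s.1
        cases hg : d.get? s.1 with
        | some v => rw [hg] at h2; simp at h2; exact absurd h2 hc
        | none => rfl
      by_cases hn : s.1 == n
      · have hns : n = s.1 := (beq_iff_eq.mp hn).symm
        rw [hns, PySem.Dict.get?_insert_self, hdnone]
        simp [List.find?]
      · have hne : n ≠ s.1 := fun h => by simp [h] at hn
        rw [PySem.Dict.get?_insert_of_ne _ _ hne]
        simp [List.find?, hn]

theorem pvG_eq_find (vs : List (String × Int)) (n : String) :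
    pvG vs n = ((vs.find? (fun p => p.1 == n)).map (·.2)).getD 0 := by
  induction vs with
  | nil => simp [pvG]
  | cons s t ih =>
    simp only [pvG, List.find?]
    by_cases h : n == s.1
    · have h' : (s.1 == n) = true := by simp [beq_iff_eq.mp h]
      simp [h, h']
    · have h' : (s.1 == n) = false := by
        simp only [beq_eq_false_iff_ne]
        exact fun he => by simp [he] at h
      simp [h, h', ih]

theorem first_getD (vs : List (String × Int)) (n : String) :
    (vs.foldl pvStep PySem.Dict.empty).getD n 0 = pvG vs n := by
  rw [PySem.Dict.getD_eq_get?_getD, first_get?, pvG_eq_find]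
  simp [PySem.Dict.get?_empty]

theorem first_contains (vs : List (String × Int)) (d : PySem.Dict String Int) (n : String) :
    (vs.foldl pvStep d).contains n = (d.contains n || vs.any (fun p => p.1 == n)) := by
  induction vs generalizing d with
  | nil => simp
  | cons s t ih =>
    rw [List.foldl_cons, List.any_cons]
    by_cases hc : d.contains s.1
    · have hstep : pvStep d s = d := by simp [pvStep, hc]
      rw [hstep, ih]
      by_cases hn : s.1 == n
      · have hns : n = s.1 := (beq_iff_eq.mp hn).symm
        rw [hns, hc]; simp
      · simp [hn]
    · have hstep : pvStep d s = d.insert s.1 s.2 := by simp [pvStep, hc]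
      rw [hstep, ih, PySem.Dict.contains_insert]
      by_cases hn : s.1 == n
      · have h' : (n == s.1) = true := by simp [beq_iff_eq.mp hn]
        simp [hn, h']
      · have h' : (n == s.1) = false := by
          simp only [beq_eq_false_iff_ne]; exact fun he => by simp [he] at hn
        simp [hn, h']

theorem first_nodup (vs : List (String × Int)) (d : PySem.Dict String Int)
    (h : d.keys.Nodup) : (vs.foldl pvStep d).keys.Nodup := by
  induction vs generalizing d with
  | nil => exact h
  | cons s t ih =>
    rw [List.foldl_cons]
    by_cases hc : d.contains s.1
    · have hstep : pvStep d s = d := by simp [pvStep, hc]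
      rw [hstep]; exact ih d h
    · have hstep : pvStep d s = d.insert s.1 s.2 := by simp [pvStep, hc]
      rw [hstep]
      exact ih _ (PySem.Dict.nodup_keys_insert d s.1 s.2 h)

theorem sum_ite_single (K : List String) (G : String → Int) (h : String) (hK : K.Nodup) :
    (K.map (fun k => if k == h then G k else 0)).sum = if h ∈ K then G h else 0 := by
  induction K with
  | nil => simp
  | cons a t ih =>
    simp only [List.map_cons, List.sum_cons, List.mem_cons]
    rcases List.nodup_cons.mp hK with ⟨ha, ht⟩
    by_cases he : a = h
    · subst he
      simp only [beq_self_eq_true, if_true, ih ht]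
      simp [ha]
    · have hba : (a == h) = false := by simp [he]
      have hne : h ≠ a := fun hh => he hh.symm
      simp only [hba, Bool.false_eq_true, if_false, zero_add, ih ht]
      by_cases hm : h ∈ t <;> simp [hm, hne]

theorem sum_map_eq_weighted (G : String → Int) (K : List String) (hK : K.Nodup)
    (hcov : ∀ r, G r ≠ 0 → r ∈ K) (l : List String) :
    (l.map G).sum = (K.map (fun k => G k * (l.count k : Int))).sum := by
  induction l with
  | nil => simp
  | cons h t ih =>
    simp only [List.map_cons, List.sum_cons, ih]
    have hsplit : (K.map (fun k => G k * ((h :: t).count k : Int))).sum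
        = (K.map (fun k => G k * (t.count k : Int))).sum
          + (K.map (fun k => if k == h then G k else 0)).sum := by
      rw [← List.sum_map_add]
      apply congrArg
      apply List.map_congr_left
      intro k _
      rw [List.count_cons]
      by_cases hkh : k = h
      · subst hkh; simp; ring
      · have hb : (k == h) = false := by simp [hkh]
        have hkh' : ¬ h = k := fun he => hkh he.symm
        simp [hb, hkh']
    rw [hsplit, sum_ite_single K G h hK]
    by_cases hm : h ∈ K
    · simp [hm]; ring
    · have hz : G h = 0 := by
        by_contra hne
        exact hm (hcov h hne)
      simp [hm, hz]

theorem pvG_eq_zero_of_not_any (vs : List (String × Int)) (r : String)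
    (hany : ¬ (vs.any (fun p => p.1 == r)) = true) : pvG vs r = 0 := by
  induction vs with
  | nil => simp [pvG]
  | cons s t iht =>
    simp only [List.any_cons, Bool.or_eq_true, not_or] at hany
    have h1 : (r == s.1) = false := by
      simp only [beq_eq_false_iff_ne]
      intro he; exact hany.1 (by simp [he])
    simp only [pvG, h1, Bool.false_eq_true, if_false]
    exact iht hany.2

-- ===== VERDICT (by name: the statement is the Claim_ definition above) =====
theorem how_many_time_spec : Claim_equal_how_many_time := by
  intro vs nl _
  unfold Spec_how_many_time how_many_time_alt
  rw [howA_eq_sum]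
  have hfold : (fun (d : PySem.Dict String Int) (p : String × Int) =>
      if d.contains p.1 then d else d.insert p.1 p.2) = pvStep := rfl
  simp only [hfold]
  have hnodup : (vs.foldl pvStep PySem.Dict.empty).keys.Nodup :=
    first_nodup vs _ (by simp)
  rw [PySem.Dict.items_eq_map_keys _ hnodup 0, List.map_map]
  have hitems : ((vs.foldl pvStep PySem.Dict.empty).keys.map
      ((fun p : String × Int => p.2 *
          (nl.foldl (fun d name => d.insert name (d.getD name 0 + 1)) PySem.Dict.empty).getD p.1 0)
        ∘ (fun k => (k, (vs.foldl pvStep PySem.Dict.empty).getD k 0))))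
      = (vs.foldl pvStep PySem.Dict.empty).keys.map
          (fun k => pvG vs k * (nl.count k : Int)) := by
    apply List.map_congr_left
    intro k _
    simp only [Function.comp]
    rw [PySem.Dict.getD_foldl_insert_add_one, first_getD]
    simp [PySem.Dict.getD_empty]
  rw [hitems]
  apply sum_map_eq_weighted _ _ hnodup
  intro r hr
  have hmem : vs.any (fun p => p.1 == r) = true := by
    by_contra hany
    exact hr (pvG_eq_zero_of_not_any vs r hany)
  rw [← PySem.Dict.contains_iff_mem_keys, first_contains, hmem, Bool.or_true]
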